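-- pv_equiv track=rewrite | github.com/devyuseon/problem-solving | boj/11625.py | find_most_have
-- ===== SOURCE A (Python) =====
-- from collections import defaultdict
--
-- def find_most_have(nums: defaultdict):
--     max_num = 0
--     most_have_list = []
--     # 가장 많이 가진 정수의 갯수를 구함
--     for v in nums.values():
--         if v > max_num:
--             max_num = v
--
--     # max_num개를 가진 정수 리스트 구함
--     for k, v in nums.items():
--         if nums[k] == max_num:
--             most_have_list.append(k)
--
--     return min(most_have_list)
-- ===== SOURCE B (Python) =====
-- def find_most_have(nums):
--     max_num = 0
--     best = None
--     for k, v in nums.items():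
--         if v > max_num:
--             max_num = v
--             best = k
--         elif v == max_num:
--             best = k if best is None else min(best, k)
--     if best is None:
--         raise ValueError("min() arg is an empty sequence")
--     return best
-- ===== Notes on version B (the rewrite author's own statement) =====
-- stated objective: alternative
-- what changed: Fuses A's two scans (max over values, then a second scan collecting keys at the max and a final min()) into a single pass that keeps the running max and the smallest key seen at that max; same asymptotic cost.
import Mathlib
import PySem

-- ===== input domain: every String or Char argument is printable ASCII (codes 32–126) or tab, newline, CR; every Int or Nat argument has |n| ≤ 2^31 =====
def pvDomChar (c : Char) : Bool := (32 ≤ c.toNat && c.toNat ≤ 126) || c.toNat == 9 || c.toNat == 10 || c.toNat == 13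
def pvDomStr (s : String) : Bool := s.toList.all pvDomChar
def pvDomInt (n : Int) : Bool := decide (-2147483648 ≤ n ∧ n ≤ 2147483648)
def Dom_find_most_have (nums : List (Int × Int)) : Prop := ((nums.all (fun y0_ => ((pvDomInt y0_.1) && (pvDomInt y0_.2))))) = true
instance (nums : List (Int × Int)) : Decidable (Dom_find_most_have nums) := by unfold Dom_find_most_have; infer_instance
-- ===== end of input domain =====

-- B fuses A's two scans (max of values, then collect keys at the max, then min) into one
-- pass keeping the running max and the smallest key seen at that max (objective:
-- alternative single-pass decomposition; same asymptotic cost).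

-- ===== PORT A =====
def find_most_have (nums : List (Int × Int)) : Int :=
  let d := PySem.Dict.ofList nums
  -- for v in nums.values(): if v > max_num: max_num = v
  let max_num := d.values.foldl (fun m v => if v > m then v else m) 0
  -- for k, v in nums.items(): if nums[k] == max_num: most_have_list.append(k)
  -- nums[k] on a defaultdict(int) is d.getD k 0 (exact: k is present, so no default fires)
  let most_have_list := d.items.foldl
    (fun acc p => if d.getD p.1 0 == max_num then acc ++ [p.1] else acc) []
  -- min(most_have_list); Pre_ excludes the empty case (Python: ValueError)
  match PySem.List.min? most_have_list (fun y => y) with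
  | some m => m
  | none => 0

-- ===== PORT B =====
def find_most_have_alt (nums : List (Int × Int)) : Int :=
  let d := PySem.Dict.ofList nums
  let st := d.items.foldl
    (fun (s : Int × Option Int) p =>
      if p.2 > s.1 then (p.2, some p.1)
      else if p.2 = s.1 then
        (s.1, some (match s.2 with | none => p.1 | some b => min b p.1))
      else s)
    (0, none)
  -- if best is None: raise ValueError; Pre_ excludes that case
  match st.2 with
  | some b => b
  | none => 0

-- ===== PRECONDITION & SPEC =====
-- Pre_ excludes exactly the inputs where Python A raises ValueError (min of an empty list):
-- dicts whose values are all negative (including the empty dict), since A's max starts at 0.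
def Pre_find_most_have (nums : List (Int × Int)) : Prop :=
  ∃ p ∈ (PySem.Dict.ofList nums).items, 0 ≤ p.2
instance (nums : List (Int × Int)) : Decidable (Pre_find_most_have nums) := by
  unfold Pre_find_most_have; infer_instance
def pvWitness_find_most_have : (List (Int × Int)) := [(3, 2), (1, 2), (5, 0)]

def Spec_find_most_have (nums : List (Int × Int)) (out : Int) : Prop := out = find_most_have_alt nums
instance (nums : List (Int × Int)) (out : Int) : Decidable (Spec_find_most_have nums out) := by unfold Spec_find_most_have; infer_instance

-- ===== CLAIM (what is proved, stated in full; the proofs are below) =====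
def Claim_equal_find_most_have : Prop := ∀ (nums : List (Int × Int)), Dom_find_most_have nums → Pre_find_most_have nums → Spec_find_most_have nums (find_most_have nums)

-- ===== LEMMAS AND PROOFS =====

-- the running max A computes over the items' values
def pvMax (l : List (Int × Int)) : Int :=
  l.foldl (fun m p => max m p.2) 0

theorem pvMax_append (l : List (Int × Int)) (p : Int × Int) :
    pvMax (l ++ [p]) = max (pvMax l) p.2 := by
  simp [pvMax, List.foldl_append]

theorem pvMax_bounds (l : List (Int × Int)) :
    0 ≤ pvMax l ∧ ∀ q ∈ l, q.2 ≤ pvMax l :=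
  PySem.List.le_foldl_max_int l (fun p => p.2) 0

theorem min?_append_singleton (xs : List Int) (k : Int) :
    PySem.List.min? (xs ++ [k]) (fun y => y) =
      some (match PySem.List.min? xs (fun y => y) with
            | none => k | some b => min b k) := by
  cases xs with
  | nil => simp [PySem.List.min?]
  | cons x t =>
    simp [PySem.List.min?_id_cons, List.foldl_append]

-- B's fused fold computes A's max together with the first component A would return
theorem core (l : List (Int × Int)) :
    l.foldl
      (fun (s : Int × Option Int) p =>
        if p.2 > s.1 then (p.2, some p.1)
        else if p.2 = s.1 then
          (s.1, some (match s.2 with | none => p.1 | some b => min b p.1))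
        else s)
      (0, none)
    = (pvMax l,
       PySem.List.min? ((l.filter (fun p => p.2 == pvMax l)).map (·.1)) (fun y => y)) := by
  induction l using List.reverseRecOn with
  | nil => simp [pvMax, PySem.List.min?]
  | append_singleton l p ih =>
    obtain ⟨hM0, hMle⟩ := pvMax_bounds l
    rw [List.foldl_append, List.foldl_cons, List.foldl_nil, ih]
    by_cases h1 : p.2 > pvMax l
    · -- new strict max: everything before it is below, so the key list is [p.1]
      have hfilt : l.filter (fun q => q.2 == pvMax (l ++ [p])) = [] := by
        rw [List.filter_eq_nil_iff]
        intro q hq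
        have := hMle q hq
        rw [pvMax_append]
        simp only [beq_iff_eq]
        omega
      have hmx : max (pvMax l) p.2 = p.2 := by omega
      rw [if_pos h1, List.filter_append, hfilt, pvMax_append, hmx]
      simp [PySem.List.min?_id_cons]
    · by_cases h2 : p.2 = pvMax l
      · -- equal to the running max: key list gains p.1 at the end
        rw [if_neg h1, if_pos h2]
        have hM' : pvMax (l ++ [p]) = pvMax l := by rw [pvMax_append]; omega
        rw [List.filter_append, hM']
        simp only [List.filter_cons, List.filter_nil, beq_iff_eq, if_pos h2,
          List.nil_append, List.map_append, List.map_cons, List.map_nil]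
        rw [min?_append_singleton]
      · -- strictly below: nothing changes
        rw [if_neg h1, if_neg h2]
        have hM' : pvMax (l ++ [p]) = pvMax l := by rw [pvMax_append]; omega
        rw [List.filter_append, hM']
        simp only [List.filter_cons, List.filter_nil, beq_iff_eq, if_neg h2,
          List.append_nil]

-- ===== VERDICT (by name: the statement is the Claim_ definition above) =====
theorem find_most_have_spec : Claim_equal_find_most_have := by
  intro nums _ _
  unfold Spec_find_most_have find_most_have find_most_have_alt
  set d := PySem.Dict.ofList nums with hd
  have hnd : d.keys.Nodup := PySem.Dict.nodup_keys_ofList nums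
  -- A's value-fold is the items-fold of pvMax
  have hvals : d.values.foldl (fun m v => if v > m then v else m) 0 = pvMax d.items := by
    have hv : d.values = d.items.map (·.2) := by simp [PySem.Dict.values]
    rw [hv, List.foldl_map, pvMax]
    apply PySem.List.foldl_congr_mem
    intro acc x _
    rcases le_or_gt x.2 acc with h | h
    · rw [if_neg (by omega)]; omega
    · rw [if_pos h]; omega
  -- A's membership test nums[k] == max_num reads the item's own value
  have hcond : d.items.foldl
      (fun acc p => if d.getD p.1 0 == pvMax d.items then acc ++ [p.1] else acc) []
    = d.items.foldl
      (fun acc p => if p.2 == pvMax d.items then acc ++ [p.1] else acc) [] := by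
    apply PySem.List.foldl_congr_mem
    intro acc p hp
    obtain ⟨k, v⟩ := p
    rw [PySem.Dict.getD_of_mem_items d hp hnd 0]
  simp only [hvals, hcond]
  rw [PySem.List.foldl_append_if (fun q : Int × Int => q.2 == pvMax d.items) (fun q => q.1) d.items []]
  rw [core d.items]
  simp
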